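-- pv_equiv track=rewrite | github.com/jackgoffinet/autoencoded-vocal-analysis | preprocessing/holy_guo_segmentation.py | get_syllable_times
-- ===== SOURCE A (Python) =====
-- def get_syllable_times(bit_vector):
-- 	onsets, offsets = [], []
-- 	i = 0
-- 	while i < len(bit_vector) and bit_vector[i]:
-- 		i+= 1
--
-- 	start = i
-- 	state = 0
-- 	while i < len(bit_vector):
-- 		if state and not bit_vector[i]:
-- 			onsets.append(start)
-- 			offsets.append(i)
-- 			state = 0
-- 		elif not state and bit_vector[i]:
-- 			start = i
-- 			state = 1
-- 		i += 1
-- 	onsets = [max(i-2, 0) for i in onsets]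
-- 	offsets = [min(i+2, len(bit_vector)-1) for i in offsets]
-- 	return onsets, offsets
-- ===== SOURCE B (Python) =====
-- def get_syllable_times(bit_vector):
-- 	n = len(bit_vector)
-- 	onsets = [j + 1 for j, (p, x) in enumerate(zip(bit_vector, bit_vector[1:])) if x and not p]
-- 	offsets = [j + 1 for j, (p, x) in enumerate(zip(bit_vector, bit_vector[1:])) if p and not x]
-- 	if bit_vector and bit_vector[0]:
-- 		offsets = offsets[1:]
-- 	k = min(len(onsets), len(offsets))
-- 	return ([max(i - 2, 0) for i in onsets[:k]],
-- 			[min(i + 2, n - 1) for i in offsets[:k]])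
-- ===== Notes on version B (the rewrite author's own statement) =====
-- stated objective: alternative
-- what changed: A's two while-loops with an explicit onset/offset state machine (state/start bookkeeping) are replaced by a stateless single scan over adjacent pairs that collects rising and falling transition indices as two comprehensions, drops the falling edge of a leading truthy run, and aligns the two lists by truncating to their common length.
import Mathlib
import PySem

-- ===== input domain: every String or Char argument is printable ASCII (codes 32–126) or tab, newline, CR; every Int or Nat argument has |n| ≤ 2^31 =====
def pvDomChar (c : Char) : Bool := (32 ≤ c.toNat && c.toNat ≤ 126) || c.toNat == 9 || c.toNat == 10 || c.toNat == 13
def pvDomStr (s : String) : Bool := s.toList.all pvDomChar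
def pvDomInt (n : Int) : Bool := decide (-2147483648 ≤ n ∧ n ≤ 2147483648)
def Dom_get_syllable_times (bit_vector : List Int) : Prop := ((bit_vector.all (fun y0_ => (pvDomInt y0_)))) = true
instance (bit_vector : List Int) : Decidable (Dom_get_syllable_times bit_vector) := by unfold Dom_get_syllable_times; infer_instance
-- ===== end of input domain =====

-- B replaces A's two while-loops and explicit onset/offset state machine by a stateless
-- scan over adjacent pairs (transition detection) plus truncation alignment; objective: alternative.

-- ===== PORT A =====
-- first while loop: skip the leading truthy run
def pvLoop1 (v : List Int) (i : Nat) : Nat :=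
  if h : i < v.length ∧ (PySem.List.pyGet? v (i : Int)).getD 0 ≠ 0 then
    pvLoop1 v (i + 1)
  else i
termination_by v.length - i
decreasing_by omega

-- second while loop: the onset/offset state machine, appending to the accumulators
def pvLoop2 (v : List Int) (i : Nat) (state : Int) (start : Int)
    (onsets offsets : List Int) : List Int × List Int :=
  if h : i < v.length then
    let x := (PySem.List.pyGet? v (i : Int)).getD 0
    if state ≠ 0 ∧ x = 0 then
      pvLoop2 v (i + 1) 0 start (onsets ++ [start]) (offsets ++ [(i : Int)])
    else if state = 0 ∧ x ≠ 0 then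
      pvLoop2 v (i + 1) 1 (i : Int) onsets offsets
    else pvLoop2 v (i + 1) state start onsets offsets
  else (onsets, offsets)
termination_by v.length - i
decreasing_by all_goals omega

def get_syllable_times (bit_vector : List Int) : List Int × List Int :=
  let i := pvLoop1 bit_vector 0
  let r := pvLoop2 bit_vector i 0 (i : Int) [] []
  (r.1.map (fun j => max (j - 2) 0),
   r.2.map (fun j => min (j + 2) ((bit_vector.length : Int) - 1)))

-- ===== PORT B =====
def get_syllable_times_alt (bit_vector : List Int) : List Int × List Int :=
  let n : Int := (bit_vector.length : Int)
  let pairs := PySem.List.enumerate (List.zip bit_vector (bit_vector.drop 1)) 0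
  let onsets := (pairs.filter (fun e => e.2.2 != 0 && e.2.1 == 0)).map (fun e => e.1 + 1)
  let offsets0 := (pairs.filter (fun e => e.2.1 != 0 && e.2.2 == 0)).map (fun e => e.1 + 1)
  let offsets := if (bit_vector.headD 0) ≠ 0 then offsets0.drop 1 else offsets0
  let k := min onsets.length offsets.length
  ((onsets.take k).map (fun i => max (i - 2) 0),
   (offsets.take k).map (fun i => min (i + 2) (n - 1)))

-- ===== PRECONDITION & SPEC =====
def Spec_get_syllable_times (bit_vector : List Int) (out : List Int × List Int) : Prop := out = get_syllable_times_alt bit_vector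
instance (bit_vector : List Int) (out : List Int × List Int) : Decidable (Spec_get_syllable_times bit_vector out) := by unfold Spec_get_syllable_times; infer_instance

-- ===== CLAIM (what is proved, stated in full; the proofs are below) =====
def Claim_equal_get_syllable_times : Prop := ∀ (bit_vector : List Int), Dom_get_syllable_times bit_vector → Spec_get_syllable_times bit_vector (get_syllable_times bit_vector)

-- ===== LEMMAS AND PROOFS =====

-- list-structural version of A's state machine, emitting (onset, offset) pairs
def pvPairs (st s i : Int) : List Int → List (Int × Int)
  | [] => []
  | x :: t =>
    if st ≠ 0 ∧ x = 0 then (s, i) :: pvPairs 0 s (i + 1) t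
    else if st = 0 ∧ x ≠ 0 then pvPairs 1 i (i + 1) t
    else pvPairs st s (i + 1) t

-- indices of rising transitions (x truthy after p falsy), prev value p, current index i
def pvUps (i p : Int) : List Int → List Int
  | [] => []
  | x :: t => (if x ≠ 0 ∧ p = 0 then [i] else []) ++ pvUps (i + 1) x t

-- indices of falling transitions
def pvDowns (i p : Int) : List Int → List Int
  | [] => []
  | x :: t => (if p ≠ 0 ∧ x = 0 then [i] else []) ++ pvDowns (i + 1) x t

-- A's whole core: skip the leading truthy run, then the state machine
def pvSkip (i : Int) : List Int → List (Int × Int)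
  | [] => []
  | x :: t => if x ≠ 0 then pvSkip (i + 1) t else pvPairs 0 0 (i + 1) t

lemma pvPairs0_irrel (l : List Int) : ∀ i s s', pvPairs 0 s i l = pvPairs 0 s' i l := by
  induction l with
  | nil => intro i s s'; rfl
  | cons x t ih =>
    intro i s s'
    by_cases hx : x = 0
    · simp only [pvPairs, hx]; simp; exact ih (i + 1) s s'
    · simp [pvPairs, hx]

lemma pvZip (l : List Int) :
    (∀ i s, List.zip (pvUps i 0 l) (pvDowns i 0 l) = pvPairs 0 s i l) ∧
    (∀ i s p, p ≠ 0 → List.zip (s :: pvUps i p l) (pvDowns i p l) = pvPairs 1 s i l) := by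
  induction l with
  | nil => constructor <;> intros <;> simp [pvUps, pvDowns, pvPairs]
  | cons x t ih =>
    constructor
    · intro i s
      by_cases hx : x = 0
      · subst hx; simp [pvUps, pvDowns, pvPairs, ih.1 (i + 1) s]
      · simp [pvUps, pvDowns, pvPairs, hx, ih.2 (i + 1) i x hx]
    · intro i s p hp
      by_cases hx : x = 0
      · subst hx
        simp [pvUps, pvDowns, pvPairs, hp, ih.1 (i + 1) s]
      · simp [pvUps, pvDowns, pvPairs, hp, hx, ih.2 (i + 1) s x hx]

lemma pvZipSkip (l : List Int) : ∀ i p, p ≠ 0 →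
    List.zip (pvUps i p l) ((pvDowns i p l).drop 1) = pvSkip i l := by
  induction l with
  | nil => intros; simp [pvUps, pvDowns, pvSkip]
  | cons x t ih =>
    intro i p hp
    by_cases hx : x = 0
    · subst hx
      simp [pvUps, pvDowns, pvSkip, hp, (pvZip t).1 (i + 1) 0]
    · have h2 := ih (i + 1) x hx
      simp only [List.drop_one] at h2
      simp [pvUps, pvDowns, pvSkip, hp, hx, h2]

lemma pvZipFst {α β : Type} (a : List α) : ∀ b : List β,
    (List.zip a b).map Prod.fst = a.take (min a.length b.length) := by
  induction a with
  | nil => intro b; simp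
  | cons x t ih =>
    intro b
    cases b with
    | nil => simp
    | cons y u => simp [List.zip_cons_cons, ih u, Nat.succ_min_succ, List.take_succ_cons]

lemma pvZipSnd {α β : Type} (a : List α) : ∀ b : List β,
    (List.zip a b).map Prod.snd = b.take (min a.length b.length) := by
  induction a with
  | nil => intro b; simp
  | cons x t ih =>
    intro b
    cases b with
    | nil => simp
    | cons y u => simp [List.zip_cons_cons, ih u, Nat.succ_min_succ, List.take_succ_cons]

lemma pvGetAt (v : List Int) (i : Nat) (x : Int) (t : List Int)
    (hd : v.drop i = x :: t) : (PySem.List.pyGet? v (i : Int)).getD 0 = x := by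
  have : v[i]? = some x := by
    have h0 : (v.drop i)[0]? = v[i]? := by simp [List.getElem?_drop]
    rw [hd] at h0; simpa using h0.symm
  simp [PySem.List.pyGet?_natCast, this]

lemma pvLoop2_bridge (l : List Int) : ∀ (v : List Int) (i : Nat) (st s : Int)
    (ons offs : List Int), v.drop i = l →
    pvLoop2 v i st s ons offs =
      (ons ++ (pvPairs st s (i : Int) l).map Prod.fst,
       offs ++ (pvPairs st s (i : Int) l).map Prod.snd) := by
  induction l with
  | nil =>
    intro v i st s ons offs hd
    have hi : ¬ i < v.length := by
      have := List.drop_eq_nil_iff.mp hd; omega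
    rw [pvLoop2]; simp [hi, pvPairs]
  | cons x t ih =>
    intro v i st s ons offs hd
    have hi : i < v.length := by
      have := congrArg List.length hd
      simp [List.length_drop] at this; omega
    have hx := pvGetAt v i x t hd
    have hd' : v.drop (i + 1) = t := by
      rw [← List.drop_drop, hd, List.drop_one, List.tail_cons]
    rw [pvLoop2]
    simp only [hi, dif_pos, hx]
    by_cases h1 : st ≠ 0 ∧ x = 0
    · rw [if_pos h1]
      rw [ih v (i + 1) 0 s (ons ++ [s]) (offs ++ [(i : Int)]) hd']
      simp [pvPairs, h1, List.append_assoc]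
    · rw [if_neg h1]
      by_cases h2 : st = 0 ∧ x ≠ 0
      · rw [if_pos h2]
        rw [ih v (i + 1) 1 (i : Int) ons offs hd']
        simp [pvPairs, h2]
      · rw [if_neg h2]
        rw [ih v (i + 1) st s ons offs hd']
        simp [pvPairs, h1, h2]

lemma pvCore_bridge (l : List Int) : ∀ (v : List Int) (i : Nat), v.drop i = l →
    pvLoop2 v (pvLoop1 v i) 0 ((pvLoop1 v i : Nat) : Int) [] [] =
      ((pvSkip (i : Int) l).map Prod.fst, (pvSkip (i : Int) l).map Prod.snd) := by
  induction l with
  | nil =>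
    intro v i hd
    have hi : ¬ i < v.length := by
      have := List.drop_eq_nil_iff.mp hd; omega
    rw [pvLoop1]; simp [hi]
    rw [pvLoop2]; simp [hi, pvSkip]
  | cons x t ih =>
    intro v i hd
    have hi : i < v.length := by
      have := congrArg List.length hd
      simp [List.length_drop] at this; omega
    have hx := pvGetAt v i x t hd
    have hd' : v.drop (i + 1) = t := by
      rw [← List.drop_drop, hd, List.drop_one, List.tail_cons]
    by_cases hxz : x = 0
    · have hcond : ¬ (i < v.length ∧ (PySem.List.pyGet? v (i : Int)).getD 0 ≠ 0) := by
        rw [hx]; simp [hxz]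
      rw [pvLoop1, dif_neg hcond]
      rw [pvLoop2_bridge (x :: t) v i 0 (i : Int) [] [] hd]
      simp [pvSkip, hxz, pvPairs, pvPairs0_irrel t ((i : Int) + 1) (i : Int) 0]
    · have hcond : i < v.length ∧ (PySem.List.pyGet? v (i : Int)).getD 0 ≠ 0 := by
        exact ⟨hi, by rw [hx]; exact hxz⟩
      rw [pvLoop1, dif_pos hcond]
      rw [ih v (i + 1) hd']
      simp [pvSkip, hxz]

lemma pvUps_bridge (t : List Int) : ∀ (p : Int) (j : Int),
    ((PySem.List.enumerate (List.zip (p :: t) t) j).filter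
        (fun e => e.2.2 != 0 && e.2.1 == 0)).map (fun e => e.1 + 1) = pvUps (j + 1) p t := by
  induction t with
  | nil => intro p j; simp [PySem.List.enumerate_nil, pvUps]
  | cons x t' ih =>
    intro p j
    rw [List.zip_cons_cons, PySem.List.enumerate_cons, List.filter_cons]
    by_cases h : x ≠ 0 ∧ p = 0
    · have hb : ((x != 0 && p == 0) = true) := by simp [h.1, h.2]
      rw [if_pos hb, List.map_cons]
      simp only [pvUps, if_pos h, List.singleton_append]
      exact congrArg (List.cons (j + 1)) (ih x (j + 1))
    · have hb : ¬ ((x != 0 && p == 0) = true) := by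
        simp only [Bool.and_eq_true, bne_iff_ne, beq_iff_eq]; exact h
      rw [if_neg hb]
      simp only [pvUps, if_neg h, List.nil_append]
      exact ih x (j + 1)

lemma pvDowns_bridge (t : List Int) : ∀ (p : Int) (j : Int),
    ((PySem.List.enumerate (List.zip (p :: t) t) j).filter
        (fun e => e.2.1 != 0 && e.2.2 == 0)).map (fun e => e.1 + 1) = pvDowns (j + 1) p t := by
  induction t with
  | nil => intro p j; simp [PySem.List.enumerate_nil, pvDowns]
  | cons x t' ih =>
    intro p j
    rw [List.zip_cons_cons, PySem.List.enumerate_cons, List.filter_cons]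
    by_cases h : p ≠ 0 ∧ x = 0
    · have hb : ((p != 0 && x == 0) = true) := by simp [h.1, h.2]
      rw [if_pos hb, List.map_cons]
      simp only [pvDowns, if_pos h, List.singleton_append]
      exact congrArg (List.cons (j + 1)) (ih x (j + 1))
    · have hb : ¬ ((p != 0 && x == 0) = true) := by
        simp only [Bool.and_eq_true, bne_iff_ne, beq_iff_eq]; exact h
      rw [if_neg hb]
      simp only [pvDowns, if_neg h, List.nil_append]
      exact ih x (j + 1)

-- ===== VERDICT (by name: the statement is the Claim_ definition above) =====
theorem get_syllable_times_spec : Claim_equal_get_syllable_times := by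
  intro v _
  unfold Spec_get_syllable_times get_syllable_times get_syllable_times_alt
  dsimp only
  cases v with
  | nil =>
    rw [pvLoop1, dif_neg (by simp), pvLoop2, dif_neg (by simp)]
    simp [PySem.List.enumerate_nil]
  | cons v0 t =>
    have hcore := pvCore_bridge (v0 :: t) (v0 :: t) 0 (by simp)
    rw [hcore]
    have hups := pvUps_bridge t v0 0
    have hdowns := pvDowns_bridge t v0 0
    simp only [List.drop_one, List.tail_cons] at *
    rw [hups, hdowns]
    simp only [zero_add]
    by_cases h0 : v0 = 0
    · subst h0
      simp only [List.headD_cons, ne_eq, not_true_eq_false, ite_false]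
      rw [← pvZipFst (pvUps 1 0 t) (pvDowns 1 0 t), ← pvZipSnd (pvUps 1 0 t) (pvDowns 1 0 t)]
      rw [(pvZip t).1 1 0]
      simp [pvSkip]
    · simp only [List.headD_cons, ne_eq, h0, not_false_eq_true, if_pos]
      rw [← List.drop_one]
      rw [← pvZipFst (pvUps 1 v0 t) ((pvDowns 1 v0 t).drop 1),
          ← pvZipSnd (pvUps 1 v0 t) ((pvDowns 1 v0 t).drop 1)]
      rw [pvZipSkip t 1 v0 h0]
      simp [pvSkip, h0]
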